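-- pv_equiv track=rewrite | github.com/Jibin-Gigi/Hacker-Rank | Software_engineer_prep_kit/place_N_cameras_without_conflicts.py | canPlaceSecurityCameras
-- ===== SOURCE A (Python) =====
-- def canPlaceSecurityCameras(N, grid):
--     if N == 0:
--         return 1
--     if N > min(len(grid), len(grid[0])):
--         return 0
--     if N > sum(row.count(0) for row in grid):
--         return 0
--
--     cols = set()
--     diagonals = set()
--     anti_diagonals = set()
--
--     def backtrack(row):
--         if row == N:
--             return 1
--
--
--         for col in range(N):
--             if grid[row][col] == 1:
--                 continue
--             if col in cols or (row-col) in diagonals or (row+col) in anti_diagonals: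
--                 continue
--
--             cols.add(col)
--             diagonals.add(row-col)
--             anti_diagonals.add(row+col)
--
--             if backtrack(row + 1):
--                 return 1
--
--             cols.remove(col)
--             diagonals.remove(row-col)
--             anti_diagonals.remove(row+col)
--
--         return 0
--
--     return backtrack(0)
-- ===== SOURCE B (Python) =====
-- def canPlaceSecurityCameras(N, grid):
--     if N == 0:
--         return 1
--     if N > min(len(grid), len(grid[0])):
--         return 0
--     if N > sum(row.count(0) for row in grid):
--         return 0
--
--     def ok(p):
--         if any(grid[r][p[r]] == 1 for r in range(N)):
--             return False
--         if len({r - p[r] for r in range(N)}) != N: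
--             return False
--         return len({r + p[r] for r in range(N)}) == N
--
--     def search(prefix, remaining):
--         if not remaining:
--             return 1 if ok(prefix) else 0
--         for i in range(len(remaining)):
--             if search(prefix + [remaining[i]], remaining[:i] + remaining[i + 1:]):
--                 return 1
--         return 0
--
--     return search([], list(range(N)))
-- ===== Notes on version B (the rewrite author's own statement) =====
-- stated objective: alternative
-- what changed: Replaces A's pruning backtracker (three conflict sets maintained incrementally, conflicts rejected before descending) with generate-and-test: enumerate full column permutations of range(N) and validate each complete assignment only at the leaf (blocked cells, and diagonal distinctness via set cardinalities); the three leading guards are kept.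
-- outside the precondition, e.g. on canPlaceSecurityCameras(2, [[1, 1, 0], [0]]): A returns 0, B returns 0; on canPlaceSecurityCameras(3, [[0, 0, 1, 0], [0, 0, 1], [1, 0]]): A returns 0, B raises IndexError; on canPlaceSecurityCameras(2, [[1, 0, 1], [0]]): A raises IndexError, B returns 0
import Mathlib
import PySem

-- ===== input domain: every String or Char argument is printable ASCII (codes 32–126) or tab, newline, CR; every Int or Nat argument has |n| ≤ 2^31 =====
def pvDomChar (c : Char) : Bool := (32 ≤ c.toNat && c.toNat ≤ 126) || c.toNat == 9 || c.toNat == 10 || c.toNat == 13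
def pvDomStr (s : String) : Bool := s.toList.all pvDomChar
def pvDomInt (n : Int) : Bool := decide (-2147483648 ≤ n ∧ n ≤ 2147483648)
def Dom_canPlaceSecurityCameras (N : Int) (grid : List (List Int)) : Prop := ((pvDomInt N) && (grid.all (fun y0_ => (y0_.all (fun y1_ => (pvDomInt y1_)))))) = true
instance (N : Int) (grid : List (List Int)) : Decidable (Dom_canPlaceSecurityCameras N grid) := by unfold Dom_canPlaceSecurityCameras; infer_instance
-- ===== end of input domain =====

-- One line: B replaces A's pruning backtracking (incremental conflict sets) by generate-and-test
-- over full column permutations, validated only at the leaf (objective: alternative algorithm, same worst-case order).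

-- ===== PORT A =====
-- cell access grid[row][col]; total via defaults, exact under Pre_ (in-range accesses only)
def pvCell (grid : List (List Int)) (row col : Int) : Int :=
  PySem.List.pyGetD (PySem.List.pyGetD grid row []) col 0

-- 'def backtrack(row)' with the three sets as explicit state; the Nat fuel is only a
-- termination device (fuel = N.toNat + 1 at the top call; it never runs out on admitted inputs:
-- row increases by 1 per level and the recursion stops at row == N).
def pvBacktrackA (grid : List (List Int)) (N : Int) :
    Nat → Int → PySem.Set Int → PySem.Set Int → PySem.Set Int → Int
  | 0, row, _, _, _ => if row == N then 1 else 0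
  | fuel + 1, row, cols, diags, antis =>
    if row == N then 1
    else
      (PySem.List.pyRange 0 N 1).foldl (fun acc col =>
        if acc ≠ 0 then acc
        else if pvCell grid row col == 1 then acc
        else if PySem.Set.contains cols col || PySem.Set.contains diags (row - col)
                || PySem.Set.contains antis (row + col) then acc
        else if pvBacktrackA grid N fuel (row + 1) (PySem.Set.add cols col)
                (PySem.Set.add diags (row - col)) (PySem.Set.add antis (row + col)) ≠ 0 then 1
        else acc) 0

def canPlaceSecurityCameras (N : Int) (grid : List (List Int)) : Int :=
  if N == 0 then 1
  else if N > min (PySem.List.len grid) (PySem.List.len (PySem.List.pyGetD grid 0 [])) then 0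
  else if N > grid.foldl (fun s row => s + PySem.List.count row 0) 0 then 0
  else pvBacktrackA grid N (N.toNat + 1) 0 PySem.Set.empty PySem.Set.empty PySem.Set.empty

-- ===== PORT B =====
-- 'def ok(p)': full-assignment test — no blocked cell, and the two diagonal key sets have N elements
def pvOkB (grid : List (List Int)) (N : Int) (p : List Int) : Bool :=
  if (PySem.List.pyRange 0 N 1).any (fun r => pvCell grid r (PySem.List.pyGetD p r 0) == 1) then false
  else if PySem.Set.len (PySem.Set.ofList
      ((PySem.List.pyRange 0 N 1).map (fun r => r - PySem.List.pyGetD p r 0))) ≠ N then false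
  else PySem.Set.len (PySem.Set.ofList
      ((PySem.List.pyRange 0 N 1).map (fun r => r + PySem.List.pyGetD p r 0))) == N

-- 'def search(pfx, remaining)': enumerate permutations; fuel is only a termination device
-- (fuel = N.toNat + 1 at the top call; remaining shrinks by one per level).
def pvSearchB (grid : List (List Int)) (N : Int) :
    Nat → List Int → List Int → Int
  | 0, pfx, remaining =>
    if remaining.isEmpty then (if pvOkB grid N pfx then 1 else 0) else 0
  | fuel + 1, pfx, remaining =>
    if remaining.isEmpty then (if pvOkB grid N pfx then 1 else 0)
    else
      (PySem.List.pyRange 0 (PySem.List.len remaining) 1).foldl (fun acc i =>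
        if acc ≠ 0 then acc
        else if pvSearchB grid N fuel (pfx ++ [PySem.List.pyGetD remaining i 0])
            (PySem.List.slice remaining none (some i) ++ PySem.List.slice remaining (some (i + 1)) none)
            ≠ 0 then 1
        else acc) 0

def canPlaceSecurityCameras_alt (N : Int) (grid : List (List Int)) : Int :=
  if N == 0 then 1
  else if N > min (PySem.List.len grid) (PySem.List.len (PySem.List.pyGetD grid 0 [])) then 0
  else if N > grid.foldl (fun s row => s + PySem.List.count row 0) 0 then 0
  else pvSearchB grid N (N.toNat + 1) [] (PySem.List.pyRange 0 N 1)

-- ===== PRECONDITION & SPEC =====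
-- Pre_ excludes ragged grids (one of the first N rows shorter than N) that are not already
-- rejected by the three guards: there A's backtracking (and B's enumeration) typically raises
-- IndexError, though either search can also die out before touching the short row and return 0.
def Pre_canPlaceSecurityCameras (N : Int) (grid : List (List Int)) : Prop :=
  N = 0 ∨ (grid ≠ [] ∧
    (N > min (grid.length : Int) (grid.headI.length : Int) ∨
     N > (grid.map (fun row => (row.count 0 : Int))).sum ∨
     ∀ row ∈ grid.take N.toNat, N ≤ (row.length : Int)))
instance (N : Int) (grid : List (List Int)) : Decidable (Pre_canPlaceSecurityCameras N grid) := by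
  unfold Pre_canPlaceSecurityCameras; infer_instance

def pvWitness_canPlaceSecurityCameras : Int × List (List Int) := (2, [[0, 1], [1, 0]])

def Spec_canPlaceSecurityCameras (N : Int) (grid : List (List Int)) (out : Int) : Prop := out = canPlaceSecurityCameras_alt N grid
instance (N : Int) (grid : List (List Int)) (out : Int) : Decidable (Spec_canPlaceSecurityCameras N grid out) := by unfold Spec_canPlaceSecurityCameras; infer_instance

-- ===== CLAIM (what is proved, stated in full; the proofs are below) =====
def Claim_equal_canPlaceSecurityCameras : Prop := ∀ (N : Int) (grid : List (List Int)), Dom_canPlaceSecurityCameras N grid → Pre_canPlaceSecurityCameras N grid → Spec_canPlaceSecurityCameras N grid (canPlaceSecurityCameras N grid)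

-- ===== LEMMAS AND PROOFS =====

-- generic early-exit loop accumulator facts
theorem pvFoldlKeep {α : Type} (g : Int → α → Int) (keep : ∀ a x, a ≠ 0 → g a x = a) :
    ∀ (l : List α) (a : Int), a ≠ 0 → l.foldl g a = a
  | [], _, _ => rfl
  | x :: l, a, ha => by rw [List.foldl_cons, keep a x ha]; exact pvFoldlKeep g keep l a ha

theorem pvFoldl01 {α : Type} (g : Int → α → Int) (keep : ∀ a x, a ≠ 0 → g a x = a)
    (h01 : ∀ x, g 0 x = 0 ∨ g 0 x = 1) :
    ∀ (l : List α), l.foldl g 0 = 0 ∨ l.foldl g 0 = 1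
  | [] => Or.inl rfl
  | x :: l => by
      rw [List.foldl_cons]
      rcases h01 x with h | h
      · rw [h]; exact pvFoldl01 g keep h01 l
      · rw [h, pvFoldlKeep g keep l 1 one_ne_zero]; exact Or.inr rfl

theorem pvFoldlEq1 {α : Type} (g : Int → α → Int) (keep : ∀ a x, a ≠ 0 → g a x = a)
    (h01 : ∀ x, g 0 x = 0 ∨ g 0 x = 1) :
    ∀ (l : List α), (l.foldl g 0 = 1 ↔ ∃ x ∈ l, g 0 x = 1)
  | [] => by simp
  | x :: l => by
      rw [List.foldl_cons]
      rcases h01 x with h | h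
      · rw [h, pvFoldlEq1 g keep h01 l]
        constructor
        · rintro ⟨y, hy, hgy⟩; exact ⟨y, List.mem_cons_of_mem _ hy, hgy⟩
        · rintro ⟨y, hy, hgy⟩
          rcases List.mem_cons.1 hy with rfl | hy
          · rw [h] at hgy; exact absurd hgy (by norm_num)
          · exact ⟨y, hy, hgy⟩
      · rw [h, pvFoldlKeep g keep l 1 one_ne_zero]
        exact ⟨fun _ => ⟨x, List.mem_cons_self, h⟩, fun _ => rfl⟩

-- a prefix of column choices is conflict-free (what A's sets enforce incrementally)
def pvOKpfx (grid : List (List Int)) (p : List Int) : Prop :=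
  ∀ i, i < p.length → (pvCell grid (i : Int) (p.getD i 0) ≠ 1 ∧
    ∀ j, j < i → ((i : Int) - p.getD i 0 ≠ (j : Int) - p.getD j 0 ∧
                  (i : Int) + p.getD i 0 ≠ (j : Int) + p.getD j 0))

theorem pvGetDapp (p : List Int) (x : Int) (i : Nat) (h : i < p.length) :
    (p ++ [x]).getD i 0 = p.getD i 0 := by
  simp [List.getD, List.getElem?_append_left h]

theorem pvGetDlast (p : List Int) (x : Int) : (p ++ [x]).getD p.length 0 = x := by simp

theorem pvOKpfx_of_append {grid : List (List Int)} {p : List Int} {x : Int}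
    (h : pvOKpfx grid (p ++ [x])) : pvOKpfx grid p := by
  intro i hi
  have hi' : i < (p ++ [x]).length := by simp; omega
  obtain ⟨h1, h2⟩ := h i hi'
  rw [pvGetDapp p x i hi] at h1
  refine ⟨h1, fun j hj => ?_⟩
  have := h2 j hj
  rw [pvGetDapp p x i hi, pvGetDapp p x j (by omega)] at this
  exact this

theorem pvOKpfx_append (grid : List (List Int)) (pfx : List Int) (col : Int)
    (hok : pvOKpfx grid pfx)
    (hcell : pvCell grid (pfx.length : Int) col ≠ 1)
    (hdiag : ∀ j, j < pfx.length → (pfx.length : Int) - col ≠ (j : Int) - pfx.getD j 0)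
    (hanti : ∀ j, j < pfx.length → (pfx.length : Int) + col ≠ (j : Int) + pfx.getD j 0) :
    pvOKpfx grid (pfx ++ [col]) := by
  intro i hi
  simp only [List.length_append, List.length_singleton] at hi
  rcases Nat.lt_or_ge i pfx.length with h | h
  · rw [pvGetDapp _ _ _ h]
    refine ⟨(hok i h).1, fun j hj => ?_⟩
    rw [pvGetDapp _ _ _ (by omega)]
    exact (hok i h).2 j hj
  · have hieq : i = pfx.length := by omega
    subst hieq
    rw [pvGetDlast]
    refine ⟨hcell, fun j hj => ?_⟩
    rw [pvGetDapp _ _ _ hj]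
    exact ⟨hdiag j hj, hanti j hj⟩

theorem pvLenOfList (xs : List Int) : (PySem.Set.ofList xs).length = xs.toFinset.card := by
  have h1 : (PySem.Set.ofList xs).toFinset = xs.toFinset := by
    ext a; simp [PySem.Set.mem_ofList]
  rw [← h1, List.toFinset_card_of_nodup (PySem.Set.nodup_ofList xs)]

theorem pvCardLt (xs : List Int) (h : ¬ xs.Nodup) : xs.toFinset.card < xs.length := by
  rw [List.card_toFinset]
  rcases Nat.lt_or_ge xs.dedup.length xs.length with hlt | hge
  · exact hlt
  · exact absurd (xs.dedup_sublist.eq_of_length (Nat.le_antisymm (xs.dedup_sublist.length_le) hge) ▸ xs.nodup_dedup) h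

-- the diagonal-key list read by pvOkB, rewritten through getD
theorem pvDiagList (p : List Int) (N : Int) (f : Int → Int → Int) :
    (PySem.List.pyRange 0 N 1).map (fun r => f r (PySem.List.pyGetD p r 0)) =
    (List.range (N.toNat)).map (fun (k : Nat) => f (k : Int) (p.getD k 0)) := by
  rw [PySem.List.pyRange_one, List.map_map]
  simp only [sub_zero]
  apply List.map_congr_left
  intro k _
  simp [Function.comp]

theorem pvLeafTrue (grid : List (List Int)) (N : Int) (hN : 0 < N) (p : List Int)
    (hlen : p.length = N.toNat) (hok : pvOKpfx grid p) : pvOkB grid N p = true := by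
  have hany : (PySem.List.pyRange 0 N 1).any
      (fun r => pvCell grid r (PySem.List.pyGetD p r 0) == 1) = false := by
    rw [List.any_eq_false]
    intro r hr
    obtain ⟨hr0, hrN⟩ := (PySem.List.mem_pyRange_one).1 hr
    have hk : r = ((r.toNat : Nat) : Int) := by omega
    have hklen : r.toNat < p.length := by omega
    rw [hk, PySem.List.pyGetD_natCast]
    have := (hok r.toNat hklen).1
    simpa using this
  have hlen1 : ∀ (f : Int → Int → Int),
      (∀ i j, j < i → i < p.length →
        f (i : Int) (p.getD i 0) ≠ f (j : Int) (p.getD j 0)) →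
      PySem.Set.len (PySem.Set.ofList
        ((PySem.List.pyRange 0 N 1).map (fun r => f r (PySem.List.pyGetD p r 0)))) = N := by
    intro f hf
    have hnd : ((PySem.List.pyRange 0 N 1).map (fun r => f r (PySem.List.pyGetD p r 0))).Nodup := by
      rw [pvDiagList]
      apply List.Nodup.map_on _ (List.nodup_range)
      intro a ha b hb hab
      rw [List.mem_range] at ha hb
      by_contra hne
      rcases Nat.lt_or_ge a b with h | h
      · exact hf b a h (by omega) hab.symm
      · exact hf a b (by omega) (by omega) hab
    have h1 := pvLenOfList ((PySem.List.pyRange 0 N 1).map (fun r => f r (PySem.List.pyGetD p r 0)))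
    rw [List.toFinset_card_of_nodup hnd] at h1
    simp only [PySem.Set.len, h1]
    simp [PySem.List.length_pyRange_one]
    omega
  unfold pvOkB
  rw [hany]
  simp only [Bool.false_eq_true, if_false]
  rw [if_neg (by
    rw [hlen1 (fun r c => r - c) (fun i j hj hi => ((hok i hi).2 j hj).1)]
    simp)]
  rw [hlen1 (fun r c => r + c) (fun i j hj hi => ((hok i hi).2 j hj).2)]
  simp

theorem pvLeafFalse (grid : List (List Int)) (N : Int) (hN : 0 < N) (p : List Int)
    (hlen : p.length = N.toNat) (hbad : ¬ pvOKpfx grid p) : pvOkB grid N p = false := by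
  obtain ⟨i, hcase⟩ := not_forall.1 hbad
  obtain ⟨hi, hcase2⟩ := Classical.not_imp.1 hcase
  have hiN : (i : Int) < N := by omega
  by_cases hcell : pvCell grid (i : Int) (p.getD i 0) = 1
  · have hany : (PySem.List.pyRange 0 N 1).any
        (fun r => pvCell grid r (PySem.List.pyGetD p r 0) == 1) = true := by
      rw [List.any_eq_true]
      refine ⟨(i : Int), (PySem.List.mem_pyRange_one).2 ⟨by omega, hiN⟩, ?_⟩
      rw [PySem.List.pyGetD_natCast]
      simpa using hcell
    unfold pvOkB
    rw [hany]
    simp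
  · have h2 : ¬ ∀ j, j < i → ((i : Int) - p.getD i 0 ≠ (j : Int) - p.getD j 0 ∧
        (i : Int) + p.getD i 0 ≠ (j : Int) + p.getD j 0) := fun h => hcase2 ⟨hcell, h⟩
    obtain ⟨j, hj2⟩ := not_forall.1 h2
    obtain ⟨hj, hjc⟩ := Classical.not_imp.1 hj2
    have hdup : ∀ (f : Int → Int → Int),
        f (i : Int) (p.getD i 0) = f (j : Int) (p.getD j 0) →
        PySem.Set.len (PySem.Set.ofList
          ((PySem.List.pyRange 0 N 1).map (fun r => f r (PySem.List.pyGetD p r 0)))) ≠ N := by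
      intro f hf hEq
      rw [pvDiagList] at hEq
      set L := (List.range (N.toNat)).map (fun (k : Nat) => f (k : Int) (p.getD k 0)) with hLdef
      have hLlen : L.length = N.toNat := by simp [hLdef]
      have hLi : L[i]'(by omega) = f (i : Int) (p.getD i 0) := by simp [hLdef]
      have hLj : L[j]'(by omega) = f (j : Int) (p.getD j 0) := by simp [hLdef]
      have hnodup : ¬ L.Nodup := by
        intro hnd
        exact (List.pairwise_iff_getElem.1 hnd j i (by omega) (by omega) hj)
          (hLj.trans (hf.symm.trans hLi.symm))
      have hcard := pvCardLt L hnodup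
      have h1 := pvLenOfList L
      simp only [PySem.Set.len] at hEq
      omega
    have hBorC : ((i : Int) - p.getD i 0 = (j : Int) - p.getD j 0) ∨
        ((i : Int) + p.getD i 0 = (j : Int) + p.getD j 0) := by
      by_contra hno
      push_neg at hno
      exact hjc ⟨hno.1, hno.2⟩
    rcases hBorC with hd | hd
    · unfold pvOkB
      split_ifs with h1 h2
      · rfl
      · rfl
      · exact absurd (hdup (fun r c => r - c) hd) h2
    · unfold pvOkB
      split_ifs with h1 h2
      · rfl
      · rfl
      · rw [beq_eq_false_iff_ne]
        exact hdup (fun r c => r + c) hd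

-- A's search only ever returns 0 or 1
theorem pvBacktrackA01 (grid : List (List Int)) (N : Int) :
    ∀ fuel row cols diags antis, pvBacktrackA grid N fuel row cols diags antis = 0 ∨
      pvBacktrackA grid N fuel row cols diags antis = 1
  | 0, row, c, d, a => by unfold pvBacktrackA; split_ifs <;> simp
  | fuel + 1, row, c, d, a => by
      unfold pvBacktrackA
      split_ifs with h1
      · simp
      · exact pvFoldl01 _ (by intro a x h; simp [h]) (by intro x; split_ifs <;> simp) _

-- bad prefixes only generate failing leaves
theorem pvZ (grid : List (List Int)) (N : Int) (hN : 0 < N) :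
    ∀ fuel (pfx remaining : List Int),
      pfx.length + remaining.length = N.toNat →
      ¬ pvOKpfx grid pfx →
      pvSearchB grid N fuel pfx remaining = 0
  | 0, pfx, remaining, hlen, hbad => by
      unfold pvSearchB
      rcases remaining with _ | ⟨r, rs⟩
      · rw [if_pos (by simp)]
        rw [pvLeafFalse grid N hN pfx (by simpa using hlen) hbad]
        simp
      · rw [if_neg (by simp)]
  | fuel + 1, pfx, remaining, hlen, hbad => by
      unfold pvSearchB
      rcases remaining with _ | ⟨r, rs⟩
      · rw [if_pos (by simp)]
        rw [pvLeafFalse grid N hN pfx (by simpa using hlen) hbad]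
        simp
      · rw [if_neg (by simp)]
        rcases pvFoldl01 (g := fun acc i =>
              if acc ≠ 0 then acc
              else if pvSearchB grid N fuel (pfx ++ [PySem.List.pyGetD (r :: rs) i 0])
                  (PySem.List.slice (r :: rs) none (some i) ++
                   PySem.List.slice (r :: rs) (some (i + 1)) none) ≠ 0 then 1
              else acc) (fun a x h => by simp [h])
            (fun x => by beta_reduce; split_ifs <;> simp)
            (PySem.List.pyRange 0 (PySem.List.len (r :: rs)) 1)
            with h0 | hone
        · exact h0
        · exfalso
          obtain ⟨i, hi, hgi⟩ := (pvFoldlEq1 _ (fun a x h => by simp [h])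
            (fun x => by split_ifs <;> simp) _).1 hone
          obtain ⟨hi0, hilt⟩ := (PySem.List.mem_pyRange_one).1 hi
          rw [PySem.List.len_eq] at hilt
          have hklen : i.toNat < (r :: rs).length := by omega
          have hrec : pvSearchB grid N fuel (pfx ++ [PySem.List.pyGetD (r :: rs) i 0])
              (PySem.List.slice (r :: rs) none (some i) ++
               PySem.List.slice (r :: rs) (some (i + 1)) none) = 0 := by
            rw [PySem.List.slice_to _ hi0, PySem.List.slice_from _ (by omega : (0:Int) ≤ i + 1)]
            apply pvZ grid N hN fuel
            · simp only [List.length_append, List.length_take, List.length_drop,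
                List.length_cons, List.length_nil]
              simp only [List.length_cons] at hklen hlen
              omega
            · intro hok; exact hbad (pvOKpfx_of_append hok)
          rw [hrec] at hgi
          simp at hgi

-- length of the remaining-columns list
theorem pvRemLen (N : Int) (pfx : List Int) (hnd : pfx.Nodup)
    (hsub : ∀ x ∈ pfx, 0 ≤ x ∧ x < N) :
    ((PySem.List.pyRange 0 N 1).filter (fun c => decide (c ∉ pfx))).length
      = N.toNat - pfx.length := by
  have hsub' : pfx ⊆ PySem.List.pyRange 0 N 1 := by
    intro x hx
    exact (PySem.List.mem_pyRange_one).2 ⟨(hsub x hx).1, (hsub x hx).2⟩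
  have hpart := List.length_eq_length_filter_add (l := PySem.List.pyRange 0 N 1)
      (fun c => decide (c ∉ pfx))
  have hmemperm : ((PySem.List.pyRange 0 N 1).filter (fun c => !decide (c ∉ pfx))).Perm pfx := by
    rw [List.perm_ext_iff_of_nodup (List.Nodup.filter _ (PySem.List.nodup_pyRange_one 0 N)) hnd]
    intro a
    simp only [List.mem_filter, Bool.not_eq_eq_eq_not, Bool.not_true, decide_eq_false_iff_not,
      not_not]
    exact ⟨fun h => h.2, fun h => ⟨hsub' h, h⟩⟩
  have h1 : ((PySem.List.pyRange 0 N 1).filter (fun c => !decide (c ∉ pfx))).length = pfx.length :=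
    hmemperm.length_eq
  have h2 : (PySem.List.pyRange 0 N 1).length = (N - 0).toNat := PySem.List.length_pyRange_one 0 N
  omega

-- the remaining list after choosing the column at position k
theorem pvRemStep (N : Int) (pfx remaining : List Int) (k : Nat) (c : Int)
    (hrem : remaining = (PySem.List.pyRange 0 N 1).filter (fun c => decide (c ∉ pfx)))
    (hk : k < remaining.length) (hc : remaining[k]'hk = c) :
    remaining.take k ++ remaining.drop (k + 1) =
      (PySem.List.pyRange 0 N 1).filter (fun y => decide (y ∉ pfx ++ [c])) := by
  have hndr : remaining.Nodup := by
    rw [hrem]; exact List.Nodup.filter _ (PySem.List.nodup_pyRange_one 0 N)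
  have h1 : remaining.take k ++ remaining.drop (k + 1) = remaining.eraseIdx k :=
    (List.eraseIdx_eq_take_drop_succ remaining k).symm
  have h2 : remaining.eraseIdx k = remaining.erase c := by
    rw [← hc]; exact (List.Nodup.erase_getElem hndr k hk).symm
  have h3 : remaining.erase c = remaining.filter (fun y => y != c) :=
    List.Nodup.erase_eq_filter hndr c
  rw [h1, h2, h3, hrem, List.filter_filter]
  congr 1
  funext y
  by_cases h : y ∈ pfx <;> by_cases h' : y = c <;> simp [h, h']

-- main correspondence: A's pruned DFS from a valid prefix = B's leaf-tested enumeration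
theorem pvNodupApp (l : List Int) (x : Int) (h : l.Nodup) (hx : x ∉ l) : (l ++ [x]).Nodup := by
  simp [List.nodup_append, h, hx]
  intro a ha heq
  exact hx (heq ▸ ha)

theorem pvLeafBoth (grid : List (List Int)) (N : Int) (hN : 0 < N) (fuel : Nat)
    (pfx : List Int) (cols diags antis : PySem.Set Int)
    (hsubB : ∀ x ∈ pfx, 0 ≤ x ∧ x < N)
    (hnd : pfx.Nodup) (hok : pvOKpfx grid pfx)
    (hrem : (PySem.List.pyRange 0 N 1).filter (fun c => decide (c ∉ pfx)) = []) :
    pvBacktrackA grid N fuel (pfx.length : Int) cols diags antis = 1 ∧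
    pvSearchB grid N fuel pfx ((PySem.List.pyRange 0 N 1).filter (fun c => decide (c ∉ pfx))) = 1 := by
  have hsub' : pfx ⊆ PySem.List.pyRange 0 N 1 := fun x hx =>
    (PySem.List.mem_pyRange_one).2 ⟨(hsubB x hx).1, (hsubB x hx).2⟩
  have hsup : ∀ c ∈ PySem.List.pyRange 0 N 1, c ∈ pfx := by
    intro c hcr
    by_contra hcp
    have hmem : c ∈ (PySem.List.pyRange 0 N 1).filter (fun c => decide (c ∉ pfx)) :=
      List.mem_filter.2 ⟨hcr, by simpa using hcp⟩
    rw [hrem] at hmem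
    exact absurd hmem (List.not_mem_nil)
  have hperm : pfx.Perm (PySem.List.pyRange 0 N 1) := by
    rw [List.perm_ext_iff_of_nodup hnd (PySem.List.nodup_pyRange_one 0 N)]
    exact fun a => ⟨fun h => hsub' h, fun h => hsup a h⟩
  have hplen : pfx.length = N.toNat := by
    have h1 := hperm.length_eq
    have h2 := PySem.List.length_pyRange_one 0 N
    omega
  have hrowN : ((pfx.length : Int) == N) = true := by
    rw [beq_iff_eq]; omega
  constructor
  · cases fuel <;> simp [pvBacktrackA, hrowN]
  · rw [hrem]
    cases fuel <;> simp [pvSearchB, pvLeafTrue grid N hN pfx hplen hok]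

theorem pvE (grid : List (List Int)) (N : Int) (hN : 0 < N) :
    ∀ fuel (pfx : List Int) (cols diags antis : PySem.Set Int),
      N.toNat ≤ fuel + pfx.length →
      (∀ x ∈ pfx, 0 ≤ x ∧ x < N) →
      pfx.Nodup →
      pvOKpfx grid pfx →
      (∀ x, x ∈ cols ↔ x ∈ pfx) →
      (∀ x, x ∈ diags ↔ ∃ j, j < pfx.length ∧ x = (j : Int) - pfx.getD j 0) →
      (∀ x, x ∈ antis ↔ ∃ j, j < pfx.length ∧ x = (j : Int) + pfx.getD j 0) →
      pvBacktrackA grid N fuel (pfx.length : Int) cols diags antis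
        = pvSearchB grid N fuel pfx
            ((PySem.List.pyRange 0 N 1).filter (fun c => decide (c ∉ pfx))) := by
  intro fuel
  induction fuel with
  | zero =>
      intro pfx cols diags antis hfuel hsubB hnd hok hc hd ha
      have hsub' : pfx ⊆ PySem.List.pyRange 0 N 1 := fun x hx =>
        (PySem.List.mem_pyRange_one).2 ⟨(hsubB x hx).1, (hsubB x hx).2⟩
      have hsp := List.subperm_of_subset hnd hsub'
      have hperm : pfx.Perm (PySem.List.pyRange 0 N 1) :=
        hsp.perm_of_length_le (by have := PySem.List.length_pyRange_one 0 N; omega)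
      have hrem : (PySem.List.pyRange 0 N 1).filter (fun c => decide (c ∉ pfx)) = [] := by
        apply List.filter_eq_nil_iff.mpr
        intro a har
        simpa using hperm.mem_iff.2 har
      obtain ⟨hA, hB⟩ := pvLeafBoth grid N hN 0 pfx cols diags antis hsubB hnd hok hrem
      rw [hA, hB]
  | succ fuel IH =>
      intro pfx cols diags antis hfuel hsubB hnd hok hc hd ha
      by_cases hrem0 : (PySem.List.pyRange 0 N 1).filter (fun c => decide (c ∉ pfx)) = []
      · obtain ⟨hA, hB⟩ := pvLeafBoth grid N hN (fuel + 1) pfx cols diags antis hsubB hnd hok hrem0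
        rw [hA, hB]
      · set rem : List Int := (PySem.List.pyRange 0 N 1).filter (fun c => decide (c ∉ pfx))
          with hremdef
        have hremlen : rem.length = N.toNat - pfx.length := pvRemLen N pfx hnd hsubB
        have hsub' : pfx ⊆ PySem.List.pyRange 0 N 1 := fun x hx =>
          (PySem.List.mem_pyRange_one).2 ⟨(hsubB x hx).1, (hsubB x hx).2⟩
        have hple : pfx.length ≤ N.toNat := by
          have := (List.subperm_of_subset hnd hsub').length_le
          have h2 := PySem.List.length_pyRange_one 0 N
          omega
        have hplenlt : pfx.length < N.toNat := by
          have := List.length_pos_iff.mpr hrem0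
          omega
        have hrowne : ¬ (((pfx.length : Int) == N) = true) := by
          rw [beq_iff_eq]; omega
        unfold pvBacktrackA pvSearchB
        rw [if_neg hrowne, if_neg (by simpa [List.isEmpty_iff] using hrem0)]
        set gA : Int → Int → Int := (fun acc col =>
            if acc ≠ 0 then acc
            else if pvCell grid ((pfx.length : Int)) col == 1 then acc
            else if PySem.Set.contains cols col
                || PySem.Set.contains diags ((pfx.length : Int) - col)
                || PySem.Set.contains antis ((pfx.length : Int) + col) then acc
            else if pvBacktrackA grid N fuel ((pfx.length : Int) + 1) (PySem.Set.add cols col)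
                (PySem.Set.add diags ((pfx.length : Int) - col))
                (PySem.Set.add antis ((pfx.length : Int) + col)) ≠ 0 then 1
            else acc) with hgA
        set gB : Int → Int → Int := (fun acc i =>
            if acc ≠ 0 then acc
            else if pvSearchB grid N fuel (pfx ++ [PySem.List.pyGetD rem i 0])
                (PySem.List.slice rem none (some i) ++
                 PySem.List.slice rem (some (i + 1)) none) ≠ 0 then 1
            else acc) with hgB
        have keepA : ∀ (a x : Int), a ≠ 0 → gA a x = a := by
          intro a x h; rw [hgA]; simp [h]
        have h01A : ∀ (x : Int), gA 0 x = 0 ∨ gA 0 x = 1 := by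
          intro x; rw [hgA]; beta_reduce; split_ifs <;> simp
        have keepB : ∀ (a x : Int), a ≠ 0 → gB a x = a := by
          intro a x h; rw [hgB]; simp [h]
        have h01B : ∀ (x : Int), gB 0 x = 0 ∨ gB 0 x = 1 := by
          intro x; rw [hgB]; beta_reduce; split_ifs <;> simp
        have hA01 := pvFoldl01 gA keepA h01A (PySem.List.pyRange 0 N 1)
        have hB01 := pvFoldl01 gB keepB h01B (PySem.List.pyRange 0 (PySem.List.len rem) 1)
        have hAiff := pvFoldlEq1 gA keepA h01A (PySem.List.pyRange 0 N 1)
        have hBiff := pvFoldlEq1 gB keepB h01B (PySem.List.pyRange 0 (PySem.List.len rem) 1)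
        suffices hiff : (∃ col ∈ PySem.List.pyRange 0 N 1, gA 0 col = 1) ↔
            (∃ i ∈ PySem.List.pyRange 0 (PySem.List.len rem) 1, gB 0 i = 1) by
          have hfoldiff : ((PySem.List.pyRange 0 N 1).foldl gA 0 = 1 ↔
              (PySem.List.pyRange 0 (PySem.List.len rem) 1).foldl gB 0 = 1) := by
            rw [hAiff, hBiff]; exact hiff
          rcases hA01 with h1 | h1 <;> rcases hB01 with h2 | h2
          · rw [h1, h2]
          · rw [h1, h2] at hfoldiff; simp at hfoldiff
          · rw [h1, h2] at hfoldiff; simp at hfoldiff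
          · rw [h1, h2]
        constructor
        · rintro ⟨col, hcolr, hgcol⟩
          obtain ⟨hcol0, hcolN⟩ := (PySem.List.mem_pyRange_one).1 hcolr
          rw [hgA] at hgcol
          beta_reduce at hgcol
          rw [if_neg (by norm_num : ¬ ((0:Int) ≠ 0))] at hgcol
          split_ifs at hgcol with hcell hconf hrec
          · norm_num at hgcol
          · norm_num at hgcol
          · -- success branch
            have hcellne : pvCell grid (pfx.length : Int) col ≠ 1 := by simpa using hcell
            have hconf3 := hconf
            simp only [Bool.or_eq_true, not_or] at hconf3
            have hcolnp : col ∉ pfx := fun hm =>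
              hconf3.1.1 (by rw [PySem.Set.contains_iff]; exact (hc col).2 hm)
            have hdiagno : ∀ j, j < pfx.length →
                (pfx.length : Int) - col ≠ (j : Int) - pfx.getD j 0 := by
              intro j hj heq
              exact hconf3.1.2 (by rw [PySem.Set.contains_iff, hd]; exact ⟨j, hj, heq⟩)
            have hantino : ∀ j, j < pfx.length →
                (pfx.length : Int) + col ≠ (j : Int) + pfx.getD j 0 := by
              intro j hj heq
              exact hconf3.2 (by rw [PySem.Set.contains_iff, ha]; exact ⟨j, hj, heq⟩)
            have hok' := pvOKpfx_append grid pfx col hok hcellne hdiagno hantino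
            have hnd' := pvNodupApp pfx col hnd hcolnp
            have hsubB' : ∀ x ∈ pfx ++ [col], 0 ≤ x ∧ x < N := by
              intro x hx
              rcases List.mem_append.1 hx with h | h
              · exact hsubB x h
              · rw [List.mem_singleton] at h; subst h; exact ⟨hcol0, hcolN⟩
            have hc' : ∀ x, x ∈ PySem.Set.add cols col ↔ x ∈ pfx ++ [col] := by
              intro x; rw [PySem.Set.mem_add, hc x]; simp
            have hd' : ∀ x, x ∈ PySem.Set.add diags ((pfx.length : Int) - col) ↔
                ∃ j, j < (pfx ++ [col]).length ∧ x = (j : Int) - (pfx ++ [col]).getD j 0 := by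
              intro x; rw [PySem.Set.mem_add, hd x]
              constructor
              · rintro (⟨j, hj, rfl⟩ | rfl)
                · exact ⟨j, by simp; omega, by rw [pvGetDapp _ _ _ hj]⟩
                · exact ⟨pfx.length, by simp, by rw [pvGetDlast]⟩
              · rintro ⟨j, hj, rfl⟩
                simp only [List.length_append, List.length_singleton] at hj
                rcases Nat.lt_or_ge j pfx.length with h | h
                · exact Or.inl ⟨j, h, by rw [pvGetDapp _ _ _ h]⟩
                · have hej : j = pfx.length := by omega
                  subst hej
                  right; rw [pvGetDlast]
            have ha' : ∀ x, x ∈ PySem.Set.add antis ((pfx.length : Int) + col) ↔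
                ∃ j, j < (pfx ++ [col]).length ∧ x = (j : Int) + (pfx ++ [col]).getD j 0 := by
              intro x; rw [PySem.Set.mem_add, ha x]
              constructor
              · rintro (⟨j, hj, rfl⟩ | rfl)
                · exact ⟨j, by simp; omega, by rw [pvGetDapp _ _ _ hj]⟩
                · exact ⟨pfx.length, by simp, by rw [pvGetDlast]⟩
              · rintro ⟨j, hj, rfl⟩
                simp only [List.length_append, List.length_singleton] at hj
                rcases Nat.lt_or_ge j pfx.length with h | h
                · exact Or.inl ⟨j, h, by rw [pvGetDapp _ _ _ h]⟩
                · have hej : j = pfx.length := by omega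
                  subst hej
                  right; rw [pvGetDlast]
            have hIH := IH (pfx ++ [col]) (PySem.Set.add cols col)
              (PySem.Set.add diags ((pfx.length : Int) - col))
              (PySem.Set.add antis ((pfx.length : Int) + col))
              (by simp only [List.length_append, List.length_singleton]; omega) hsubB' hnd' hok' hc' hd' ha'
            have hcast : (((pfx ++ [col]).length : Nat) : Int) = (pfx.length : Int) + 1 := by
              simp
            rw [hcast] at hIH
            have hrecv : pvBacktrackA grid N fuel ((pfx.length : Int) + 1) (PySem.Set.add cols col)
                (PySem.Set.add diags ((pfx.length : Int) - col))
                (PySem.Set.add antis ((pfx.length : Int) + col)) = 1 := by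
              rcases pvBacktrackA01 grid N fuel ((pfx.length : Int) + 1) (PySem.Set.add cols col)
                (PySem.Set.add diags ((pfx.length : Int) - col))
                (PySem.Set.add antis ((pfx.length : Int) + col)) with h | h
              · exact absurd h hrec
              · exact h
            have hsearch1 : pvSearchB grid N fuel (pfx ++ [col])
                ((PySem.List.pyRange 0 N 1).filter (fun c => decide (c ∉ pfx ++ [col]))) = 1 := by
              rw [← hIH]; exact hrecv
            have hcolrem : col ∈ rem := by
              rw [hremdef]
              exact List.mem_filter.2 ⟨hcolr, by simpa using hcolnp⟩
            obtain ⟨k, hk, hkc⟩ := List.mem_iff_getElem.mp hcolrem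
            refine ⟨(k : Int), (PySem.List.mem_pyRange_one).2 ⟨by positivity, ?_⟩, ?_⟩
            · rw [PySem.List.len_eq]; exact_mod_cast hk
            · rw [hgB]; beta_reduce
              rw [if_neg (by norm_num : ¬ ((0:Int) ≠ 0))]
              rw [PySem.List.pyGetD_natCast, List.getD_eq_getElem rem 0 hk, hkc]
              rw [PySem.List.slice_to _ (by positivity), PySem.List.slice_from _ (by positivity)]
              have ht1 : ((k : Int)).toNat = k := by omega
              have ht2 : ((k : Int) + 1).toNat = k + 1 := by omega
              rw [ht1, ht2, pvRemStep N pfx rem k col hremdef hk hkc, hsearch1]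
              norm_num
          · norm_num at hgcol
        · rintro ⟨i, hir, hgi⟩
          obtain ⟨hi0, hilt⟩ := (PySem.List.mem_pyRange_one).1 hir
          rw [PySem.List.len_eq] at hilt
          have hk : i.toNat < rem.length := by omega
          have hik : i = ((i.toNat : Nat) : Int) := by omega
          set col := rem[i.toNat]'hk with hcoldef
          have hcolrem : col ∈ rem := List.getElem_mem hk
          have hcolfil := List.mem_filter.1 (hremdef ▸ hcolrem)
          have hcolr : col ∈ PySem.List.pyRange 0 N 1 := hcolfil.1
          have hcolnp : col ∉ pfx := by simpa using hcolfil.2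
          obtain ⟨hcol0, hcolN⟩ := (PySem.List.mem_pyRange_one).1 hcolr
          rw [hgB] at hgi
          beta_reduce at hgi
          rw [if_neg (by norm_num : ¬ ((0:Int) ≠ 0))] at hgi
          rw [hik, PySem.List.pyGetD_natCast, List.getD_eq_getElem rem 0 hk, ← hcoldef] at hgi
          rw [PySem.List.slice_to _ (by positivity), PySem.List.slice_from _ (by positivity)] at hgi
          have ht1 : ((i.toNat : Int)).toNat = i.toNat := by omega
          have ht2 : ((i.toNat : Int) + 1).toNat = i.toNat + 1 := by omega
          rw [ht1, ht2, pvRemStep N pfx rem i.toNat col hremdef hk hcoldef.symm] at hgi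
          have hS : pvSearchB grid N fuel (pfx ++ [col])
              ((PySem.List.pyRange 0 N 1).filter (fun y => decide (y ∉ pfx ++ [col]))) ≠ 0 := by
            intro h0; rw [h0] at hgi; simp at hgi
          have hnd' := pvNodupApp pfx col hnd hcolnp
          have hsubB' : ∀ x ∈ pfx ++ [col], 0 ≤ x ∧ x < N := by
            intro x hx
            rcases List.mem_append.1 hx with h | h
            · exact hsubB x h
            · rw [List.mem_singleton] at h; subst h; exact ⟨hcol0, hcolN⟩
          have hlenZ : (pfx ++ [col]).length +
              ((PySem.List.pyRange 0 N 1).filter (fun y => decide (y ∉ pfx ++ [col]))).length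
              = N.toNat := by
            rw [pvRemLen N (pfx ++ [col]) hnd' hsubB']
            simp
            omega
          by_cases hcell : pvCell grid (pfx.length : Int) col = 1
          · exact absurd (pvZ grid N hN fuel _ _ hlenZ (fun hok' => by
              have h1 := (hok' pfx.length (by simp)).1
              rw [pvGetDlast] at h1
              exact h1 hcell)) hS
          · by_cases hdup1 : ∃ j, j < pfx.length ∧
                (pfx.length : Int) - col = (j : Int) - pfx.getD j 0
            · exact absurd (pvZ grid N hN fuel _ _ hlenZ (fun hok' => by
                obtain ⟨j, hj, heq⟩ := hdup1
                have h1 := ((hok' pfx.length (by simp)).2 j hj).1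
                rw [pvGetDlast, pvGetDapp _ _ _ hj] at h1
                exact h1 heq)) hS
            · by_cases hdup2 : ∃ j, j < pfx.length ∧
                  (pfx.length : Int) + col = (j : Int) + pfx.getD j 0
              · exact absurd (pvZ grid N hN fuel _ _ hlenZ (fun hok' => by
                  obtain ⟨j, hj, heq⟩ := hdup2
                  have h1 := ((hok' pfx.length (by simp)).2 j hj).2
                  rw [pvGetDlast, pvGetDapp _ _ _ hj] at h1
                  exact h1 heq)) hS
              · refine ⟨col, hcolr, ?_⟩
                have hok' := pvOKpfx_append grid pfx col hok hcell
                  (fun j hj heq => hdup1 ⟨j, hj, heq⟩) (fun j hj heq => hdup2 ⟨j, hj, heq⟩)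
                have hc' : ∀ x, x ∈ PySem.Set.add cols col ↔ x ∈ pfx ++ [col] := by
                  intro x; rw [PySem.Set.mem_add, hc x]; simp
                have hd' : ∀ x, x ∈ PySem.Set.add diags ((pfx.length : Int) - col) ↔
                    ∃ j, j < (pfx ++ [col]).length ∧ x = (j : Int) - (pfx ++ [col]).getD j 0 := by
                  intro x; rw [PySem.Set.mem_add, hd x]
                  constructor
                  · rintro (⟨j, hj, rfl⟩ | rfl)
                    · exact ⟨j, by simp; omega, by rw [pvGetDapp _ _ _ hj]⟩
                    · exact ⟨pfx.length, by simp, by rw [pvGetDlast]⟩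
                  · rintro ⟨j, hj, rfl⟩
                    simp only [List.length_append, List.length_singleton] at hj
                    rcases Nat.lt_or_ge j pfx.length with h | h
                    · exact Or.inl ⟨j, h, by rw [pvGetDapp _ _ _ h]⟩
                    · have hej : j = pfx.length := by omega
                      subst hej
                      right; rw [pvGetDlast]
                have ha' : ∀ x, x ∈ PySem.Set.add antis ((pfx.length : Int) + col) ↔
                    ∃ j, j < (pfx ++ [col]).length ∧ x = (j : Int) + (pfx ++ [col]).getD j 0 := by
                  intro x; rw [PySem.Set.mem_add, ha x]
                  constructor
                  · rintro (⟨j, hj, rfl⟩ | rfl)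
                    · exact ⟨j, by simp; omega, by rw [pvGetDapp _ _ _ hj]⟩
                    · exact ⟨pfx.length, by simp, by rw [pvGetDlast]⟩
                  · rintro ⟨j, hj, rfl⟩
                    simp only [List.length_append, List.length_singleton] at hj
                    rcases Nat.lt_or_ge j pfx.length with h | h
                    · exact Or.inl ⟨j, h, by rw [pvGetDapp _ _ _ h]⟩
                    · have hej : j = pfx.length := by omega
                      subst hej
                      right; rw [pvGetDlast]
                have hIH := IH (pfx ++ [col]) (PySem.Set.add cols col)
                  (PySem.Set.add diags ((pfx.length : Int) - col))
                  (PySem.Set.add antis ((pfx.length : Int) + col))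
                  (by simp only [List.length_append, List.length_singleton]; omega) hsubB' hnd' hok' hc' hd' ha'
                have hcast : (((pfx ++ [col]).length : Nat) : Int) = (pfx.length : Int) + 1 := by
                  simp
                rw [hcast] at hIH
                rw [hgA]; beta_reduce
                rw [if_neg (by norm_num : ¬ ((0:Int) ≠ 0))]
                rw [if_neg (show ¬ ((pvCell grid (pfx.length : Int) col == 1) = true) by
                  simpa using hcell)]
                rw [if_neg (show ¬ ((PySem.Set.contains cols col
                    || PySem.Set.contains diags ((pfx.length : Int) - col)
                    || PySem.Set.contains antis ((pfx.length : Int) + col)) = true) by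
                  simp only [Bool.or_eq_true, not_or]
                  refine ⟨⟨?_, ?_⟩, ?_⟩
                  · intro hcm; rw [PySem.Set.contains_iff, hc] at hcm; exact hcolnp hcm
                  · intro hcm; rw [PySem.Set.contains_iff, hd] at hcm; exact hdup1 hcm
                  · intro hcm; rw [PySem.Set.contains_iff, ha] at hcm; exact hdup2 hcm)]
                rw [if_pos (show pvBacktrackA grid N fuel ((pfx.length : Int) + 1)
                    (PySem.Set.add cols col) (PySem.Set.add diags ((pfx.length : Int) - col))
                    (PySem.Set.add antis ((pfx.length : Int) + col)) ≠ 0 by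
                  rw [hIH]; exact hS)]

-- ===== VERDICT (by name: the statement is the Claim_ definition above) =====
theorem canPlaceSecurityCameras_spec : Claim_equal_canPlaceSecurityCameras := by
  unfold Claim_equal_canPlaceSecurityCameras
  intro N grid _ _
  unfold Spec_canPlaceSecurityCameras
  unfold canPlaceSecurityCameras canPlaceSecurityCameras_alt
  split_ifs with h0 h2 h3
  · rfl
  · rfl
  · rfl
  · rcases lt_trichotomy N 0 with hneg | hz | hpos
    · have ht : N.toNat = 0 := by omega
      rw [ht]
      have hr : PySem.List.pyRange 0 N 1 = [] := PySem.List.pyRange_one_eq_nil (by omega)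
      have h0N : (0 : Int) ≠ N := by omega
      simp [pvBacktrackA, pvSearchB, pvOkB, hr, h0N, PySem.Set.len]
    · exact absurd (by simp [hz]) h0
    · have hE := pvE grid N hpos (N.toNat + 1) [] PySem.Set.empty PySem.Set.empty PySem.Set.empty
        (by simp) (by simp) (List.nodup_nil)
        (fun i hi => absurd hi (by simp))
        (by intro x; simp [PySem.Set.empty])
        (by
          intro x
          constructor
          · intro hx; exact absurd hx (by simp [PySem.Set.empty])
          · rintro ⟨j, hj, _⟩; exact absurd hj (by simp))
        (by
          intro x
          constructor
          · intro hx; exact absurd hx (by simp [PySem.Set.empty])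
          · rintro ⟨j, hj, _⟩; exact absurd hj (by simp))
      simp only [List.length_nil, Nat.cast_zero] at hE
      have hfilter : (PySem.List.pyRange 0 N 1).filter (fun c => decide (c ∉ ([] : List Int)))
          = PySem.List.pyRange 0 N 1 := by simp
      rw [hfilter] at hE
      exact hE
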